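-- pv_equiv track=rewrite | github.com/wiksat/AlghorithmsAndDataStructures | ASD/BitAlgo-Summer/egzp8a/egzP8a.py | reklamy
-- ===== SOURCE A (Python) =====
-- def bisect_right(a, x, lo=0, hi=None, *, key=None):
--     if hi is None:
--         hi = len(a)
--     if key is None:
--         while lo < hi:
--             mid = (lo + hi) // 2
--             # if x < a[mid]:
--             if a[mid] <= x:
--                 # hi = mid
--                 lo = mid + 1
--             else:
--                 # lo = mid + 1
--                 hi = mid
--     return lo
--
-- def reklamy ( T, S, o ):
--     #Tutaj proszę wpisać własną implementację
--     n = len(T)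
--     for i in range(n):
--         T[i] = (T[i][0], T[i][1], S[i])
--     T = sorted(T, key=lambda x: x[0])
--     BEST_RIGHT=[0 for _ in range(n)]
--     BEST_RIGHT[n-1]=T[n-1][2]
--     for i in range(n-2,-1,-1):
--         BEST_RIGHT[i]=max(T[i][2],BEST_RIGHT[i+1]) #wartość najlepszego przedziału od prawej strony do obecnego
--     STARTS=[i[0] for i in T]
--     result=0
--     for i in range(n):
--         end=T[i][1]
--         idx=bisect_right(STARTS,end,i+1)
--         second=0
--         if idx<n and STARTS[idx]!=end:
--             second=BEST_RIGHT[idx]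
--         result=max(result,T[i][2]+second)
--     return result
-- ===== SOURCE B (Python) =====
-- def reklamy(T, S, o):
--     # Same in-place update of T as A (T[i] gets value S[i]); then instead of a
--     # suffix-max table + hand-written binary search, a direct per-interval scan.
--     n = len(T)
--     for i in range(n):
--         T[i] = (T[i][0], T[i][1], S[i])
--     U = sorted(T, key=lambda t: t[0])
--     result = 0
--     for k, (_, e, v) in enumerate(U):
--         second = max((w for a2, _, w in U[k + 1:] if a2 > e), default=0)
--         result = max(result, v + second)
--     return result
-- ===== Notes on version B (the rewrite author's own statement) =====
-- stated objective: simpler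
-- what changed: B keeps A's in-place update of T but replaces the suffix-maximum table plus hand-written binary search over the sorted start array by a direct scan: for each interval it takes the max value over the later-sorted intervals whose start exceeds its end (default 0).
import Mathlib
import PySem

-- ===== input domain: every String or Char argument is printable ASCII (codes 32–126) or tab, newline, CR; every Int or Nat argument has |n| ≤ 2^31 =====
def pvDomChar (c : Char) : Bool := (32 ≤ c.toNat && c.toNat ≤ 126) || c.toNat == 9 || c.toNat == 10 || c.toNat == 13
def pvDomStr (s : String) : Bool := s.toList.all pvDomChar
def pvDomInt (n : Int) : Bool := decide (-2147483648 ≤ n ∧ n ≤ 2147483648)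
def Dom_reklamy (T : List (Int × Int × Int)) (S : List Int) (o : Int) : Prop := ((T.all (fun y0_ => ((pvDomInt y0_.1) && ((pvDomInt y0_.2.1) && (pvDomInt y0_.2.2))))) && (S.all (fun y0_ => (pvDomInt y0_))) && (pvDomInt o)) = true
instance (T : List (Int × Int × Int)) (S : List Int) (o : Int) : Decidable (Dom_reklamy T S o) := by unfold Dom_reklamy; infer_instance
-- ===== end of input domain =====

-- B keeps A's in-place update of T but replaces the suffix-max table + hand-written binary
-- search by a direct per-interval scan over the later sorted intervals (simpler).


-- ===== PORT A =====
-- A's hand-written bisect_right (the key=None path its call uses); the 'none' branch is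
-- Python's IndexError, unreachable for 0 ≤ lo, hi ≤ len a.
def bisectRightA (a : List Int) (x : Int) (lo hi : Int) : Int :=
  if h : lo < hi then
    let mid := PySem.Int.floordiv (lo + hi) 2
    match PySem.List.pyGet? a mid with
    | some v => if v ≤ x then bisectRightA a x (mid + 1) hi else bisectRightA a x lo mid
    | none => lo
  else lo
termination_by (hi - lo).toNat
decreasing_by
  · have := PySem.Int.floordiv_two_mid_bounds (lo := lo) (hi := hi) (le_of_lt h)
    have h2 : PySem.Int.floordiv (lo + hi) 2 < hi := by
      rw [PySem.Int.floordiv_lt_iff_lt_mul (by omega)]; omega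
    omega
  · have := PySem.Int.floordiv_two_mid_bounds (lo := lo) (hi := hi) (le_of_lt h)
    have h2 : PySem.Int.floordiv (lo + hi) 2 < hi := by
      rw [PySem.Int.floordiv_lt_iff_lt_mul (by omega)]; omega
    omega

def reklamy (T : List (Int × Int × Int)) (S : List Int) (o : Int) : Int :=
  let n : Int := T.length
  let T1 := (PySem.List.pyRange 0 n 1).foldl (fun acc i =>
      match PySem.List.pyGet? acc i, PySem.List.pyGet? S i with
      | some t, some s => PySem.List.pySetD acc i (t.1, t.2.1, s)
      | _, _ => acc) T
  let Ts := PySem.List.sorted T1 (fun t => t.1)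
  let br0 : List Int := (PySem.List.pyRange 0 n 1).map (fun _ => 0)
  let br1 := PySem.List.pySetD br0 (n - 1) (PySem.List.pyGetD Ts (n - 1) (0, 0, 0)).2.2
  let br := (PySem.List.pyRange (n - 2) (-1) (-1)).foldl (fun acc i =>
      PySem.List.pySetD acc i
        (max (PySem.List.pyGetD Ts i (0, 0, 0)).2.2 (PySem.List.pyGetD acc (i + 1) 0))) br1
  let starts := Ts.map (fun t => t.1)
  (PySem.List.pyRange 0 n 1).foldl (fun result i =>
      let e := (PySem.List.pyGetD Ts i (0, 0, 0)).2.1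
      let idx := bisectRightA starts e (i + 1) n
      let second :=
        if idx < n ∧ PySem.List.pyGetD starts idx 0 ≠ e then PySem.List.pyGetD br idx 0 else 0
      max result ((PySem.List.pyGetD Ts i (0, 0, 0)).2.2 + second)) 0

-- ===== PORT B =====
-- B mutates T exactly like A (ported as the same fold, return value only), then scans.
def reklamy_alt (T : List (Int × Int × Int)) (S : List Int) (o : Int) : Int :=
  let n : Int := T.length
  let T1 := (PySem.List.pyRange 0 n 1).foldl (fun acc i =>
      match PySem.List.pyGet? acc i with
      | some t =>
        match PySem.List.pyGet? S i with
        | some s => PySem.List.pySetD acc i (t.1, t.2.1, s)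
        | none => acc
      | none => acc) T
  let U := PySem.List.sorted T1 (fun t => t.1)
  (PySem.List.enumerate U 0).foldl (fun result kt =>
      let e := kt.2.2.1
      let v := kt.2.2.2
      let second := PySem.List.maxD
        (((PySem.List.slice U (some (kt.1 + 1)) none).filter (fun t => e < t.1)).map
          (fun t => t.2.2)) (fun w => w) 0
      max result (v + second)) 0

-- ===== PRECONDITION & SPEC =====
-- Pre_ excludes exactly the inputs on which A raises IndexError: an empty T
-- (BEST_RIGHT[n-1] on an empty list) and an S shorter than T (S[i] out of range).
def Pre_reklamy (T : List (Int × Int × Int)) (S : List Int) (o : Int) : Prop :=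
  T ≠ [] ∧ T.length ≤ S.length
instance (T : List (Int × Int × Int)) (S : List Int) (o : Int) : Decidable (Pre_reklamy T S o) := by
  unfold Pre_reklamy; infer_instance
def pvWitness_reklamy : (List (Int × Int × Int)) × List Int × Int := ([(1, 5, 0), (6, 8, 0)], [4, 7], 0)

def Spec_reklamy (T : List (Int × Int × Int)) (S : List Int) (o : Int) (out : Int) : Prop := out = reklamy_alt T S o
instance (T : List (Int × Int × Int)) (S : List Int) (o : Int) (out : Int) : Decidable (Spec_reklamy T S o out) := by unfold Spec_reklamy; infer_instance

-- ===== CLAIM (what is proved, stated in full; the proofs are below) =====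
def Claim_equal_reklamy : Prop := ∀ (T : List (Int × Int × Int)) (S : List Int) (o : Int), Dom_reklamy T S o → Pre_reklamy T S o → Spec_reklamy T S o (reklamy T S o)

-- ===== LEMMAS AND PROOFS =====

-- max of the values of the suffix starting at j (0 when empty)
def pvM (Ts : List (Int × Int × Int)) (j : Nat) : Int :=
  PySem.List.maxD ((Ts.drop j).map (fun t => t.2.2)) (fun w => w) 0

lemma pv_foldl_max (t : List Int) (a b : Int) :
    t.foldl max (max a b) = max a (t.foldl max b) := by
  induction t generalizing b with
  | nil => rfl
  | cons c t ih => simp only [List.foldl_cons, max_assoc, ih]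

lemma pvM_last (Ts : List (Int × Int × Int)) (j : Nat) (hj : j + 1 = Ts.length) :
    pvM Ts j = (Ts[j]'(by omega)).2.2 := by
  have hj' : j < Ts.length := by omega
  unfold pvM
  rw [List.drop_eq_getElem_cons hj', List.drop_eq_nil_of_le (by omega)]
  simp [PySem.List.maxD, PySem.List.max?_id_cons]

lemma pvM_rec (Ts : List (Int × Int × Int)) (j : Nat) (hj : j + 1 < Ts.length) :
    pvM Ts j = max ((Ts[j]'(by omega)).2.2) (pvM Ts (j + 1)) := by
  have hj1 : j < Ts.length := by omega
  have hj2 : j + 1 < Ts.length := hj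
  unfold pvM
  rw [List.drop_eq_getElem_cons hj1, List.drop_eq_getElem_cons hj2]
  simp only [List.map_cons]
  rw [PySem.List.maxD, PySem.List.maxD, PySem.List.max?_id_cons, PySem.List.max?_id_cons]
  simp only [List.foldl_cons, Option.getD_some]
  exact pv_foldl_max _ _ _

lemma pv_br_fold (Ts : List (Int × Int × Int)) :
    ∀ (k : Nat), k < Ts.length →
    ∀ acc : List Int, acc.length = Ts.length →
      (∀ j : Nat, k ≤ j → j < Ts.length → acc.getD j 0 = pvM Ts j) →
      ∀ j : Nat, j < Ts.length →
        ((PySem.List.pyRange ((k : Int) - 1) (-1) (-1)).foldl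
          (fun acc i => PySem.List.pySetD acc i
            (max (PySem.List.pyGetD Ts i (0, 0, 0)).2.2 (PySem.List.pyGetD acc (i + 1) 0))) acc).getD j 0
        = pvM Ts j := by
  intro k
  induction k with
  | zero =>
    intro _ acc _ hacc j hj
    rw [show ((0 : Nat) : Int) - 1 = -1 by omega, PySem.List.pyRange_neg_one_eq_nil (by omega)]
    exact hacc j (Nat.zero_le j) hj
  | succ k ih =>
    intro hk acc hlen hacc j hj
    have hk1 : k + 1 < Ts.length := hk
    rw [show ((k + 1 : Nat) : Int) - 1 = (k : Int) by omega]
    rw [PySem.List.pyRange_neg_one_cons (by omega), List.foldl_cons]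
    have hval : (PySem.List.pyGetD Ts (k : Int) (0, 0, 0)).2.2 = (Ts[k]'(by omega)).2.2 := by
      rw [PySem.List.pyGetD_natCast, List.getD_eq_getElem Ts (0,0,0) (by omega)]
    have hnext : PySem.List.pyGetD acc ((k : Int) + 1) 0 = pvM Ts (k + 1) := by
      rw [show ((k : Int) + 1) = ((k + 1 : Nat) : Int) by omega, PySem.List.pyGetD_natCast]
      exact hacc (k + 1) le_rfl hk1
    rw [show ((k : Int) - 1) = ((k : Nat) : Int) - 1 by omega] at ih
    have hset : PySem.List.pySetD acc (k : Int)
          (max (PySem.List.pyGetD Ts (k : Int) (0, 0, 0)).2.2 (PySem.List.pyGetD acc ((k : Int) + 1) 0))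
        = acc.set k (pvM Ts k) := by
      rw [PySem.List.pySetD_natCast, hval, hnext, ← pvM_rec Ts k hk1]
    rw [hset]
    refine ih (by omega) (acc.set k (pvM Ts k)) (by simpa using hlen) ?_ j hj
    intro j' hj1 hj2
    by_cases hjk : j' = k
    · subst hjk
      rw [List.getD_eq_getElem?_getD]
      simp [List.getElem?_set, show j' < acc.length by omega]
    · rw [List.getD_eq_getElem?_getD]
      simp only [List.getElem?_set, if_neg (show ¬ k = j' by omega)]
      rw [← List.getD_eq_getElem?_getD]
      exact hacc j' (by omega) hj2

lemma pv_bisect_spec (a : List Int) (x : Int) (hs : a.Pairwise (· ≤ ·)) :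
    ∀ (lo hi : Int), 0 ≤ lo → lo ≤ hi → hi ≤ (a.length : Int) →
      lo ≤ bisectRightA a x lo hi ∧ bisectRightA a x lo hi ≤ hi ∧
      (∀ j : Nat, lo ≤ (j : Int) → (j : Int) < bisectRightA a x lo hi → a.getD j 0 ≤ x) ∧
      (∀ j : Nat, bisectRightA a x lo hi ≤ (j : Int) → (j : Int) < hi → x < a.getD j 0) := by
  intro lo hi
  induction hfuel : (hi - lo).toNat using Nat.strong_induction_on generalizing lo hi with
  | _ fuel ih =>
  intro h0 hlh hhl
  rw [bisectRightA]
  by_cases hlt : lo < hi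
  · rw [dif_pos hlt]
    simp only []
    have hmb := PySem.Int.floordiv_two_mid_bounds (lo := lo) (hi := hi) (le_of_lt hlt)
    have hmhi : PySem.Int.floordiv (lo + hi) 2 < hi := by
      rw [PySem.Int.floordiv_lt_iff_lt_mul (by omega)]; omega
    set mid := PySem.Int.floordiv (lo + hi) 2 with hmid
    have hmlo : lo ≤ mid := hmb.1
    have hmlen : mid.toNat < a.length := by omega
    have hget : PySem.List.pyGet? a mid = some (a[mid.toNat]'hmlen) := by
      have h' : PySem.List.pyGet? a mid = a[mid.toNat]? := PySem.List.pyGet?_of_nonneg a (by omega)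
      rw [h', List.getElem?_eq_getElem hmlen]
    rw [hget]
    simp only []
    have hpg := List.pairwise_iff_getElem.mp hs
    by_cases hvx : a[mid.toNat]'hmlen ≤ x
    · rw [if_pos hvx]
      obtain ⟨r1, r2, r3, r4⟩ :=
        ih (hi - (mid + 1)).toNat (by omega) (mid + 1) hi rfl (by omega) (by omega) hhl
      refine ⟨by omega, r2, ?_, r4⟩
      intro j hj1 hj2
      by_cases hjm : (j : Int) ≤ mid
      · have hjlen : j < a.length := by omega
        rw [List.getD_eq_getElem a 0 hjlen]
        have hmono : a[j]'hjlen ≤ a[mid.toNat]'hmlen := by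
          rcases Nat.lt_or_ge j mid.toNat with hl | hg
          · exact hpg j mid.toNat hjlen hmlen hl
          · have : j = mid.toNat := by omega
            subst this
            exact le_rfl
        exact le_trans hmono hvx
      · have := r3 j (by omega) hj2
        rwa [List.getD_eq_getElem a 0 (by omega)] at this ⊢
    · rw [if_neg hvx]
      obtain ⟨r1, r2, r3, r4⟩ :=
        ih (mid - lo).toNat (by omega) lo mid rfl h0 (by omega) (by omega)
      refine ⟨r1, by omega, r3, ?_⟩
      intro j hj1 hj2
      by_cases hjm : (j : Int) < mid
      · exact r4 j hj1 hjm
      · have hjlen : j < a.length := by omega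
        rw [List.getD_eq_getElem a 0 hjlen]
        have hxm : x < a[mid.toNat]'hmlen := not_le.mp hvx
        have hmono : a[mid.toNat]'hmlen ≤ a[j]'hjlen := by
          rcases Nat.lt_or_ge mid.toNat j with hl | hg
          · exact hpg mid.toNat j hmlen hjlen hl
          · have : j = mid.toNat := by omega
            subst this
            exact le_rfl
        exact lt_of_lt_of_le hxm hmono
  · rw [dif_neg hlt]
    refine ⟨le_rfl, hlh, ?_, ?_⟩
    · intro j hj1 hj2
      exact absurd hj2 (by omega)
    · intro j hj1 hj2
      exact absurd hj2 (by omega)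

lemma pv_filter_drop (Ts : List (Int × Int × Int)) (e : Int) (i q : Nat)
    (hq : q ≤ Ts.length) (hiq : i + 1 ≤ q)
    (hlow : ∀ j : Nat, i + 1 ≤ j → j < q → (Ts.getD j (0, 0, 0)).1 ≤ e)
    (hhigh : ∀ j : Nat, q ≤ j → j < Ts.length → e < (Ts.getD j (0, 0, 0)).1) :
    (Ts.drop (i + 1)).filter (fun t => e < t.1) = Ts.drop q := by
  have hsplit : Ts.drop (i + 1) = (Ts.drop (i + 1)).take (q - (i + 1)) ++ Ts.drop q := by
    conv_lhs => rw [← List.take_append_drop (q - (i + 1)) (Ts.drop (i + 1))]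
    rw [List.drop_drop, show i + 1 + (q - (i + 1)) = q by omega]
  rw [hsplit, List.filter_append]
  have h1 : ((Ts.drop (i + 1)).take (q - (i + 1))).filter (fun t => decide (e < t.1)) = [] := by
    rw [List.filter_eq_nil_iff]
    intro t ht
    obtain ⟨m, hmlt, hmeq⟩ := List.getElem_of_mem ht
    have hm1 : m < q - (i + 1) := by
      have := hmlt
      simp [List.length_take, List.length_drop] at this
      omega
    have hm2 : i + 1 + m < Ts.length := by omega
    have : t = Ts[i + 1 + m]'hm2 := by
      rw [← hmeq, List.getElem_take, List.getElem_drop]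
    have hle := hlow (i + 1 + m) (by omega) (by omega)
    rw [List.getD_eq_getElem _ _ hm2] at hle
    simp [this, not_lt.mpr hle]
  have h2 : (Ts.drop q).filter (fun t => decide (e < t.1)) = Ts.drop q := by
    rw [List.filter_eq_self]
    intro t ht
    obtain ⟨m, hmlt, hmeq⟩ := List.getElem_of_mem ht
    have hm2 : q + m < Ts.length := by
      have := hmlt
      simp [List.length_drop] at this
      omega
    have : t = Ts[q + m]'hm2 := by rw [← hmeq, List.getElem_drop]
    have hgt := hhigh (q + m) (by omega) (by omega)
    rw [List.getD_eq_getElem _ _ hm2] at hgt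
    simp [this, hgt]
  rw [h1, h2, List.nil_append]

lemma pv_second_eq (Ts : List (Int × Int × Int)) (hs : Ts.Pairwise (fun a b => a.1 ≤ b.1))
    (br : List Int) (hbr : ∀ j : Nat, j < Ts.length → br.getD j 0 = pvM Ts j)
    (i : Nat) (hi : i < Ts.length) :
    (if bisectRightA (Ts.map (fun t => t.1)) ((Ts.getD i (0, 0, 0)).2.1) ((i : Int) + 1) (Ts.length : Int) < (Ts.length : Int) ∧
        PySem.List.pyGetD (Ts.map (fun t => t.1))
          (bisectRightA (Ts.map (fun t => t.1)) ((Ts.getD i (0, 0, 0)).2.1) ((i : Int) + 1) (Ts.length : Int)) 0 ≠ (Ts.getD i (0, 0, 0)).2.1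
     then PySem.List.pyGetD br
          (bisectRightA (Ts.map (fun t => t.1)) ((Ts.getD i (0, 0, 0)).2.1) ((i : Int) + 1) (Ts.length : Int)) 0
     else 0)
    = PySem.List.maxD
        (((Ts.drop (i + 1)).filter (fun t => (Ts.getD i (0, 0, 0)).2.1 < t.1)).map (fun t => t.2.2))
        (fun w => w) 0 := by
  set s := Ts.map (fun t => t.1) with hsdef
  have hslen : s.length = Ts.length := by simp [hsdef]
  have hsp : s.Pairwise (· ≤ ·) := List.Pairwise.map _ (fun a b hab => hab) hs
  have hsget : ∀ j : Nat, j < Ts.length → s.getD j 0 = (Ts.getD j (0, 0, 0)).1 := by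
    intro j hj
    rw [hsdef, List.getD_eq_getElem _ _ (by simpa using hj), List.getElem_map,
      List.getD_eq_getElem _ _ hj]
  set e := (Ts.getD i (0, 0, 0)).2.1 with hedef
  obtain ⟨h1, h2, h3, h4⟩ := pv_bisect_spec s e hsp ((i : Int) + 1) (Ts.length : Int)
    (by omega) (by exact_mod_cast (by omega : i + 1 ≤ Ts.length)) (by rw [hslen])
  set idx := bisectRightA s e ((i : Int) + 1) (Ts.length : Int) with hidxdef
  have hidx0 : 0 ≤ idx := by omega
  set q := idx.toNat with hqdef
  have hqi : (q : Int) = idx := Int.toNat_of_nonneg hidx0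
  have hql : q ≤ Ts.length := by omega
  have hiq : i + 1 ≤ q := by omega
  have hlow : ∀ j : Nat, i + 1 ≤ j → j < q → (Ts.getD j (0, 0, 0)).1 ≤ e := by
    intro j ha hb
    have := h3 j (by omega) (by omega)
    rwa [hsget j (by omega)] at this
  have hhigh : ∀ j : Nat, q ≤ j → j < Ts.length → e < (Ts.getD j (0, 0, 0)).1 := by
    intro j ha hb
    have := h4 j (by omega) (by omega)
    rwa [hsget j hb] at this
  have hfilter := pv_filter_drop Ts e i q hql hiq hlow hhigh
  by_cases hqn : q = Ts.length
  · rw [if_neg (by intro hc; omega)]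
    rw [hfilter, hqn, List.drop_length]
    simp [PySem.List.maxD, PySem.List.max?]
  · have hqlt : q < Ts.length := by omega
    have hgt : e < s.getD q 0 := by
      have := h4 q (by omega) (by omega)
      exact this
    have hcond : idx < (Ts.length : Int) ∧ PySem.List.pyGetD s idx 0 ≠ e := by
      refine ⟨by omega, ?_⟩
      rw [← hqi, PySem.List.pyGetD_natCast]
      exact (ne_of_lt hgt).symm
    rw [if_pos hcond, hfilter, ← hqi, PySem.List.pyGetD_natCast, hbr q hqlt]
    rfl

-- the mutation fold preserves the list length
lemma pv_mut_len (S : List Int) (l : List Int) (acc : List (Int × Int × Int)) :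
    (l.foldl (fun acc i =>
      match PySem.List.pyGet? acc i, PySem.List.pyGet? S i with
      | some t, some s => PySem.List.pySetD acc i (t.1, t.2.1, s)
      | _, _ => acc) acc).length = acc.length := by
  induction l generalizing acc with
  | nil => rfl
  | cons x l ih =>
    rw [List.foldl_cons, ih]
    rcases h1 : PySem.List.pyGet? acc x with _ | t <;> rcases h2 : PySem.List.pyGet? S x with _ | s
      <;> simp [PySem.List.length_pySetD]

-- ===== VERDICT (by name: the statement is the Claim_ definition above) =====
theorem reklamy_spec : Claim_equal_reklamy := by
  intro T S o _ hpre
  obtain ⟨hne, hSlen⟩ := hpre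
  unfold Spec_reklamy reklamy reklamy_alt
  simp only []
  have hfun : (fun (acc : List (Int × Int × Int)) (i : Int) =>
      match PySem.List.pyGet? acc i with
      | some t =>
        match PySem.List.pyGet? S i with
        | some s => PySem.List.pySetD acc i (t.1, t.2.1, s)
        | none => acc
      | none => acc)
      = (fun (acc : List (Int × Int × Int)) (i : Int) =>
      match PySem.List.pyGet? acc i, PySem.List.pyGet? S i with
      | some t, some s => PySem.List.pySetD acc i (t.1, t.2.1, s)
      | _, _ => acc) := by
    funext acc i
    rcases PySem.List.pyGet? acc i with _ | t <;> rcases PySem.List.pyGet? S i with _ | s <;> rfl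
  rw [hfun]
  set n : Int := (T.length : Int) with hn
  set T1 := (PySem.List.pyRange 0 n 1).foldl (fun acc i =>
      match PySem.List.pyGet? acc i, PySem.List.pyGet? S i with
      | some t, some s => PySem.List.pySetD acc i (t.1, t.2.1, s)
      | _, _ => acc) T with hT1
  set Ts := PySem.List.sorted T1 (fun t => t.1) with hTs
  have hT1len : T1.length = T.length := by rw [hT1]; exact pv_mut_len S _ T
  have hTslen : Ts.length = T.length := by rw [hTs, PySem.List.length_sorted, hT1len]
  have hTpos : 0 < T.length := List.length_pos_of_ne_nil hne
  have hsorted : Ts.Pairwise (fun a b => a.1 ≤ b.1) := PySem.List.sorted_pairwise T1 _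
  -- the BEST_RIGHT list computes the suffix maxima
  set br0 : List Int := (PySem.List.pyRange 0 n 1).map (fun _ => 0) with hbr0
  have hbr0len : br0.length = T.length := by
    rw [hbr0, List.length_map, PySem.List.length_pyRange_one]; omega
  set br1 := PySem.List.pySetD br0 (n - 1) (PySem.List.pyGetD Ts (n - 1) (0, 0, 0)).2.2 with hbr1
  have hlast : n - 1 = ((T.length - 1 : Nat) : Int) := by omega
  have hbr1eq : br1 = br0.set (T.length - 1) (pvM Ts (T.length - 1)) := by
    rw [hbr1, hlast, PySem.List.pySetD_natCast, PySem.List.pyGetD_natCast,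
      List.getD_eq_getElem Ts (0,0,0) (by omega), ← pvM_last Ts _ (by omega)]
  have hbr1len : br1.length = T.length := by rw [hbr1eq]; simpa using hbr0len
  have hbrfold := pv_br_fold Ts (T.length - 1) (by omega) br1 (by omega) ?hacc
  case hacc =>
    intro j hj1 hj2
    have hj : j = T.length - 1 := by omega
    subst hj
    rw [hbr1eq, List.getD_eq_getElem?_getD]
    simp [show T.length - 1 < br0.length by omega]
  set br := (PySem.List.pyRange (n - 2) (-1) (-1)).foldl (fun acc i =>
      PySem.List.pySetD acc i
        (max (PySem.List.pyGetD Ts i (0, 0, 0)).2.2 (PySem.List.pyGetD acc (i + 1) 0))) br1 with hbrdef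
  have hbr : ∀ j : Nat, j < Ts.length → br.getD j 0 = pvM Ts j := by
    intro j hj
    have h2 : ((T.length - 1 : Nat) : Int) - 1 = n - 2 := by omega
    have := hbrfold j (by omega)
    rwa [h2, ← hbrdef] at this
  -- rewrite B's fold over enumerate as a fold over the index range
  rw [PySem.List.enumerate_eq_map_pyRange (d := (0,0,0)), List.foldl_map]
  have hlenTs : PySem.List.len Ts = n := by simp [PySem.List.len, hTslen, hn]
  rw [hlenTs]
  -- index-wise equality of the two loop bodies
  refine PySem.List.foldl_congr_mem _ _ _ _ ?_
  intro acc x hx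
  have hx' := (PySem.List.mem_pyRange_one).mp hx
  obtain ⟨i, hi, rfl⟩ : ∃ i : Nat, i < T.length ∧ x = (i : Int) := ⟨x.toNat, by omega, by omega⟩
  simp only []
  have hsec := pv_second_eq Ts hsorted br hbr i (by omega)
  rw [hTslen, ← hn] at hsec
  rw [PySem.List.pyGetD_natCast]
  have hslice : PySem.List.slice Ts (some ((i : Int) + 1)) none = Ts.drop (i + 1) := by
    rw [show ((i : Int) + 1) = ((i + 1 : Nat) : Int) by push_cast; ring,
        PySem.List.slice_from_natCast]
  rw [hslice, ← hsec]
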